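-- pv_equiv track=rewrite | github.com/padhu2040/Vedic-Astro-v2 | astro_engine.py | generate_360_persona
-- ===== SOURCE A (Python) =====
-- def generate_360_persona(lagna_rasi, moon_rasi, sav_scores, p_pos, bhava_placements, lang="English"):
--     persona = {}
--
--     # 1. CORE ARCHETYPE TITLES (Simha Lagna + Dhanu Moon example = "The Visionary Commander")
--     # This is a sample matrix. You can expand these titles in the future.
--     archetypes = {
--         (5, 9): "The Visionary Commander (Strategic, Inspiring, Uncompromising)",
--         (12, 7): "The Diplomatic Mystic (Empathetic, Imaginative, Harmonious)"
--     }
--     # Fallback if specific combo isn't defined yet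
--     default_title = "The Strategic Architect (Analytical, Driven, Independent)"
--     persona['Archetype'] = archetypes.get((lagna_rasi, moon_rasi), default_title)
--
--     # 2. CALCULATE CAREER PATH (Corporate vs Business)
--     h6_score = sav_scores[(lagna_rasi - 1 + 5) % 12] # Corporate/Service
--     h7_score = sav_scores[(lagna_rasi - 1 + 6) % 12] # Business/Partners
--     h10_score = sav_scores[(lagna_rasi - 1 + 9) % 12] # Leadership
--
--     career_profile = ""
--     if h10_score >= 30:
--         career_profile += "**The Executive Setup:** You are wired for the top of the pyramid. You operate best when given total autonomy and a team to direct. "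
--     if h6_score > h7_score:
--         career_profile += "**Corporate Path:** You have a massive competitive advantage in structured corporate environments. You easily out-work rivals and thrive in complex hierarchies."
--     else:
--         career_profile += "**Business Path:** You possess an entrepreneurial spirit. You are built for equity, independent ventures, and leveraging strategic partnerships over standard employment."
--     persona['Professional'] = career_profile
--
--     # 3. CALCULATE INTELLECT & STUDIES
--     h5_score = sav_scores[(lagna_rasi - 1 + 4) % 12]
--     if h5_score >= 28:
--         persona['Studies'] = "You possess a highly absorbent intellect. You learn exceptionally fast and do well in structured academic environments or complex technical certifications."
--     else:
--         persona['Studies'] = "You are an experiential learner. Traditional classroom memorization may bore you. You master subjects by doing, building, and applying concepts in the real world."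
--
--     # 4. CALCULATE RELATIONSHIPS & FAMILY
--     h4_score = sav_scores[(lagna_rasi - 1 + 3) % 12]
--     if h4_score >= 28:
--         persona['Relationships'] = "You draw immense power from a stable home life. Your private domestic space is your fortress, and you invest heavily in maintaining family harmony."
--     else:
--         persona['Relationships'] = "You are fiercely independent. Your sense of 'home' is tied to your ambitions rather than a physical place. In relationships, you require a partner who respects your need for space and continuous growth."
--
--     # 5. SUPERPOWERS & SHADOW (Based on top and bottom SAV scores)
--     sorted_houses = sorted([(sav_scores[(lagna_rasi-1+i)%12], i+1) for i in range(12)], key=lambda x: x[0], reverse=True)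
--     top_house = sorted_houses[0][1]
--     bottom_house = sorted_houses[-1][1]
--
--     superpower_map = {
--         1: "Magnetic presence and physical vitality.", 2: "Financial compounding and persuasive speech.",
--         3: "Fearless execution and risk-taking.", 4: "Emotional intelligence and asset building.",
--         5: "Creative genius and rapid problem solving.", 6: "Crushing obstacles and outlasting competition.",
--         7: "Mastery of negotiation and human psychology.", 8: "Crisis management and uncovering hidden truths.",
--         9: "High-level strategic wisdom and natural luck.", 10: "Commanding authority and industry leadership.",
--         11: "Building massive networks and scaling profits.", 12: "Global vision and deep spiritual intuition."
--     }
--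
--     shadow_map = {
--         1: "Can struggle with self-doubt or burnout.", 2: "Prone to fluctuating finances if undisciplined.",
--         3: "May hesitate to take necessary leaps of faith.", 4: "Can experience inner restlessness or domestic friction.",
--         5: "Over-analyzes decisions; struggles to delegate.", 6: "Avoids direct confrontation; easily stressed by rivals.",
--         7: "Attracts imbalanced partnerships or codependency.", 8: "Fears sudden changes; resists necessary transformations.",
--         9: "Can become dogmatic or rigid in personal beliefs.", 10: "Struggles to find consistent career recognition.",
--         11: "Networks may drain energy rather than provide ROI.", 12: "Prone to burnout from poor boundary setting."
--     }
--
--     persona['Strengths'] = superpower_map.get(top_house, "Adaptable and resilient.")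
--     persona['Shadow'] = shadow_map.get(bottom_house, "Requires conscious self-reflection.")
--
--     return persona
-- ===== SOURCE B (Python) =====
-- def generate_360_persona(lagna_rasi, moon_rasi, sav_scores, p_pos, bhava_placements, lang="English"):
--     archetypes = {
--         (5, 9): "The Visionary Commander (Strategic, Inspiring, Uncompromising)",
--         (12, 7): "The Diplomatic Mystic (Empathetic, Imaginative, Harmonious)"
--     }
--     default_title = "The Strategic Architect (Analytical, Driven, Independent)"
--
--     def house_score(i):
--         return sav_scores[(lagna_rasi - 1 + i) % 12]
--
--     h4, h5, h6, h7, h10 = (house_score(i) for i in (3, 4, 5, 6, 9))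
--
--     career_profile = ""
--     if h10 >= 30:
--         career_profile += "**The Executive Setup:** You are wired for the top of the pyramid. You operate best when given total autonomy and a team to direct. "
--     if h6 > h7:
--         career_profile += "**Corporate Path:** You have a massive competitive advantage in structured corporate environments. You easily out-work rivals and thrive in complex hierarchies."
--     else:
--         career_profile += "**Business Path:** You possess an entrepreneurial spirit. You are built for equity, independent ventures, and leveraging strategic partnerships over standard employment."
--
--     # single scan instead of build-list + stable reverse sort:
--     # top house = first maximum (strict >), bottom house = last minimum (<=)
--     top_s = bot_s = house_score(0)
--     top_h = bot_h = 1
--     for i in range(1, 12):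
--         s = house_score(i)
--         if s > top_s:
--             top_s, top_h = s, i + 1
--         if s <= bot_s:
--             bot_s, bot_h = s, i + 1
--
--     superpower_map = {
--         1: "Magnetic presence and physical vitality.", 2: "Financial compounding and persuasive speech.",
--         3: "Fearless execution and risk-taking.", 4: "Emotional intelligence and asset building.",
--         5: "Creative genius and rapid problem solving.", 6: "Crushing obstacles and outlasting competition.",
--         7: "Mastery of negotiation and human psychology.", 8: "Crisis management and uncovering hidden truths.",
--         9: "High-level strategic wisdom and natural luck.", 10: "Commanding authority and industry leadership.",
--         11: "Building massive networks and scaling profits.", 12: "Global vision and deep spiritual intuition."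
--     }
--     shadow_map = {
--         1: "Can struggle with self-doubt or burnout.", 2: "Prone to fluctuating finances if undisciplined.",
--         3: "May hesitate to take necessary leaps of faith.", 4: "Can experience inner restlessness or domestic friction.",
--         5: "Over-analyzes decisions; struggles to delegate.", 6: "Avoids direct confrontation; easily stressed by rivals.",
--         7: "Attracts imbalanced partnerships or codependency.", 8: "Fears sudden changes; resists necessary transformations.",
--         9: "Can become dogmatic or rigid in personal beliefs.", 10: "Struggles to find consistent career recognition.",
--         11: "Networks may drain energy rather than provide ROI.", 12: "Prone to burnout from poor boundary setting."
--     }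
--
--     return {
--         'Archetype': archetypes.get((lagna_rasi, moon_rasi), default_title),
--         'Professional': career_profile,
--         'Studies': ("You possess a highly absorbent intellect. You learn exceptionally fast and do well in structured academic environments or complex technical certifications."
--                     if h5 >= 28 else
--                     "You are an experiential learner. Traditional classroom memorization may bore you. You master subjects by doing, building, and applying concepts in the real world."),
--         'Relationships': ("You draw immense power from a stable home life. Your private domestic space is your fortress, and you invest heavily in maintaining family harmony."
--                           if h4 >= 28 else
--                           "You are fiercely independent. Your sense of 'home' is tied to your ambitions rather than a physical place. In relationships, you require a partner who respects your need for space and continuous growth."),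
--         'Strengths': superpower_map.get(top_h, "Adaptable and resilient."),
--         'Shadow': shadow_map.get(bot_h, "Requires conscious self-reflection."),
--     }
-- ===== Notes on version B (the rewrite author's own statement) =====
-- stated objective: simpler
-- what changed: Replaces A's build-12-pairs + stable reverse sort used only to pick the top and bottom house with a single scan tracking the first maximum (strict >) and last minimum (<=), and returns the persona dict as one literal instead of incremental key assignments.
import Mathlib
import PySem

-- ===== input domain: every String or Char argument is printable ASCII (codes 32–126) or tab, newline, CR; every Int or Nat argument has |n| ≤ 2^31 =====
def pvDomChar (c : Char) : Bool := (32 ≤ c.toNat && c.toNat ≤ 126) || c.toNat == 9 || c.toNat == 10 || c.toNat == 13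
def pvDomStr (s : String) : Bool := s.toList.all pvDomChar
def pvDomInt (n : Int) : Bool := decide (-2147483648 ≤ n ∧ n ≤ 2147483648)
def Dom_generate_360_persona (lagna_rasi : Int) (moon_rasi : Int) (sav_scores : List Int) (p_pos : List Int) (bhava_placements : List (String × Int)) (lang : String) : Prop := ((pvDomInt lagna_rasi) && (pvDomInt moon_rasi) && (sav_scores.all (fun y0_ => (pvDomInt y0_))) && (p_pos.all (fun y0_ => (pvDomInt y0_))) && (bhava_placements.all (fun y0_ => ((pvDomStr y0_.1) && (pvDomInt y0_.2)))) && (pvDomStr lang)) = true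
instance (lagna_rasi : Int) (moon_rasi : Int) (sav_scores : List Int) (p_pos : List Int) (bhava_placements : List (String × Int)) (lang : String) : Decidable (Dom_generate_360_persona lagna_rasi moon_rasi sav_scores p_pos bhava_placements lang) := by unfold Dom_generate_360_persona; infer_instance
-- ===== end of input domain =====

-- B replaces A's build-12-pairs + stable reverse sort (to pick top/bottom house) by one scan
-- tracking first maximum / last minimum, and returns the persona dict as one literal; simpler, no sort.

-- Shared text constants (identical literals in both Python versions)
def pvDefaultTitle : String := "The Strategic Architect (Analytical, Driven, Independent)"
def pvArchetypes : PySem.Dict (Int × Int) String := PySem.Dict.mk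
  [((5, 9), "The Visionary Commander (Strategic, Inspiring, Uncompromising)"),
   ((12, 7), "The Diplomatic Mystic (Empathetic, Imaginative, Harmonious)")]
def pvExec : String := "**The Executive Setup:** You are wired for the top of the pyramid. You operate best when given total autonomy and a team to direct. "
def pvCorp : String := "**Corporate Path:** You have a massive competitive advantage in structured corporate environments. You easily out-work rivals and thrive in complex hierarchies."
def pvBiz : String := "**Business Path:** You possess an entrepreneurial spirit. You are built for equity, independent ventures, and leveraging strategic partnerships over standard employment."
def pvStud1 : String := "You possess a highly absorbent intellect. You learn exceptionally fast and do well in structured academic environments or complex technical certifications."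
def pvStud2 : String := "You are an experiential learner. Traditional classroom memorization may bore you. You master subjects by doing, building, and applying concepts in the real world."
def pvRel1 : String := "You draw immense power from a stable home life. Your private domestic space is your fortress, and you invest heavily in maintaining family harmony."
def pvRel2 : String := "You are fiercely independent. Your sense of 'home' is tied to your ambitions rather than a physical place. In relationships, you require a partner who respects your need for space and continuous growth."
def pvSuperpowerMap : PySem.Dict Int String := PySem.Dict.mk
  [(1, "Magnetic presence and physical vitality."), (2, "Financial compounding and persuasive speech."),
   (3, "Fearless execution and risk-taking."), (4, "Emotional intelligence and asset building."),
   (5, "Creative genius and rapid problem solving."), (6, "Crushing obstacles and outlasting competition."),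
   (7, "Mastery of negotiation and human psychology."), (8, "Crisis management and uncovering hidden truths."),
   (9, "High-level strategic wisdom and natural luck."), (10, "Commanding authority and industry leadership."),
   (11, "Building massive networks and scaling profits."), (12, "Global vision and deep spiritual intuition.")]
def pvShadowMap : PySem.Dict Int String := PySem.Dict.mk
  [(1, "Can struggle with self-doubt or burnout."), (2, "Prone to fluctuating finances if undisciplined."),
   (3, "May hesitate to take necessary leaps of faith."), (4, "Can experience inner restlessness or domestic friction."),
   (5, "Over-analyzes decisions; struggles to delegate."), (6, "Avoids direct confrontation; easily stressed by rivals."),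
   (7, "Attracts imbalanced partnerships or codependency."), (8, "Fears sudden changes; resists necessary transformations."),
   (9, "Can become dogmatic or rigid in personal beliefs."), (10, "Struggles to find consistent career recognition."),
   (11, "Networks may drain energy rather than provide ROI."), (12, "Prone to burnout from poor boundary setting.")]

-- ===== PORT A =====
def generate_360_persona (lagna_rasi : Int) (moon_rasi : Int) (sav_scores : List Int) (p_pos : List Int) (bhava_placements : List (String × Int)) (lang : String) : List (String × String) :=
  let archetype := PySem.Dict.getD pvArchetypes (lagna_rasi, moon_rasi) pvDefaultTitle
  let h6_score := PySem.List.pyGetD sav_scores (PySem.Int.mod (lagna_rasi - 1 + 5) 12) 0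
  let h7_score := PySem.List.pyGetD sav_scores (PySem.Int.mod (lagna_rasi - 1 + 6) 12) 0
  let h10_score := PySem.List.pyGetD sav_scores (PySem.Int.mod (lagna_rasi - 1 + 9) 12) 0
  let career_profile : String := ""
  let career_profile := if h10_score ≥ 30 then career_profile ++ pvExec else career_profile
  let career_profile := if h6_score > h7_score then career_profile ++ pvCorp else career_profile ++ pvBiz
  let h5_score := PySem.List.pyGetD sav_scores (PySem.Int.mod (lagna_rasi - 1 + 4) 12) 0
  let studies := if h5_score ≥ 28 then pvStud1 else pvStud2
  let h4_score := PySem.List.pyGetD sav_scores (PySem.Int.mod (lagna_rasi - 1 + 3) 12) 0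
  let relationships := if h4_score ≥ 28 then pvRel1 else pvRel2
  let sorted_houses := PySem.List.sorted
    ((PySem.List.pyRange 0 12).map (fun i => (PySem.List.pyGetD sav_scores (PySem.Int.mod (lagna_rasi - 1 + i) 12) 0, i + 1)))
    (fun x => x.1) true
  let top_house := (PySem.List.pyGetD sorted_houses 0 ((0 : Int), (0 : Int))).2
  let bottom_house := (PySem.List.pyGetD sorted_houses (-1) ((0 : Int), (0 : Int))).2
  let strengths := PySem.Dict.getD pvSuperpowerMap top_house "Adaptable and resilient."
  let shadow := PySem.Dict.getD pvShadowMap bottom_house "Requires conscious self-reflection."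
  (PySem.Dict.insert (PySem.Dict.insert (PySem.Dict.insert (PySem.Dict.insert (PySem.Dict.insert (PySem.Dict.insert
    (PySem.Dict.mk ([] : List (String × String)))
    "Archetype" archetype) "Professional" career_profile) "Studies" studies)
    "Relationships" relationships) "Strengths" strengths) "Shadow" shadow).items

-- ===== PORT B =====
def pvHouseScore (lagna_rasi : Int) (sav_scores : List Int) (i : Int) : Int :=
  PySem.List.pyGetD sav_scores (PySem.Int.mod (lagna_rasi - 1 + i) 12) 0

def pvTopStep (lagna_rasi : Int) (sav_scores : List Int) (m : Int × Int) (i : Int) : Int × Int :=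
  if pvHouseScore lagna_rasi sav_scores i > m.1 then (pvHouseScore lagna_rasi sav_scores i, i + 1) else m

def pvBotStep (lagna_rasi : Int) (sav_scores : List Int) (m : Int × Int) (i : Int) : Int × Int :=
  if pvHouseScore lagna_rasi sav_scores i ≤ m.1 then (pvHouseScore lagna_rasi sav_scores i, i + 1) else m

def generate_360_persona_alt (lagna_rasi : Int) (moon_rasi : Int) (sav_scores : List Int) (p_pos : List Int) (bhava_placements : List (String × Int)) (lang : String) : List (String × String) :=
  let h4 := pvHouseScore lagna_rasi sav_scores 3
  let h5 := pvHouseScore lagna_rasi sav_scores 4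
  let h6 := pvHouseScore lagna_rasi sav_scores 5
  let h7 := pvHouseScore lagna_rasi sav_scores 6
  let h10 := pvHouseScore lagna_rasi sav_scores 9
  let career_profile : String := ""
  let career_profile := if h10 ≥ 30 then career_profile ++ pvExec else career_profile
  let career_profile := if h6 > h7 then career_profile ++ pvCorp else career_profile ++ pvBiz
  -- single scan: top = first maximum (strict >), bottom = last minimum (≤)
  let s0 := pvHouseScore lagna_rasi sav_scores 0
  let st := (PySem.List.pyRange 1 12).foldl
    (fun (st : (Int × Int) × Int × Int) i =>
      (pvTopStep lagna_rasi sav_scores st.1 i, pvBotStep lagna_rasi sav_scores st.2 i))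
    ((s0, 1), (s0, 1))
  [("Archetype", PySem.Dict.getD pvArchetypes (lagna_rasi, moon_rasi) pvDefaultTitle),
   ("Professional", career_profile),
   ("Studies", if h5 ≥ 28 then pvStud1 else pvStud2),
   ("Relationships", if h4 ≥ 28 then pvRel1 else pvRel2),
   ("Strengths", PySem.Dict.getD pvSuperpowerMap st.1.2 "Adaptable and resilient."),
   ("Shadow", PySem.Dict.getD pvShadowMap st.2.2 "Requires conscious self-reflection.")]

-- ===== PRECONDITION & SPEC =====
-- Python A indexes sav_scores at (lagna_rasi-1+i) % 12 for i = 0..11, i.e. at every position up to 11: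
-- it raises IndexError exactly when the top position 11 is out of range, i.e. when fewer than 12 entries.
def Pre_generate_360_persona (lagna_rasi : Int) (moon_rasi : Int) (sav_scores : List Int) (p_pos : List Int) (bhava_placements : List (String × Int)) (lang : String) : Prop :=
  PySem.Raise.InRange sav_scores.length 11 ∧ 12 ≤ sav_scores.length
instance (lagna_rasi : Int) (moon_rasi : Int) (sav_scores : List Int) (p_pos : List Int) (bhava_placements : List (String × Int)) (lang : String) : Decidable (Pre_generate_360_persona lagna_rasi moon_rasi sav_scores p_pos bhava_placements lang) := by unfold Pre_generate_360_persona; infer_instance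

def pvWitness_generate_360_persona : Int × Int × List Int × List Int × (List (String × Int)) × String :=
  (5, 9, [28, 30, 25, 27, 31, 29, 26, 24, 33, 28, 30, 22], [], [], "English")

def Spec_generate_360_persona (lagna_rasi : Int) (moon_rasi : Int) (sav_scores : List Int) (p_pos : List Int) (bhava_placements : List (String × Int)) (lang : String) (out : List (String × String)) : Prop := out = generate_360_persona_alt lagna_rasi moon_rasi sav_scores p_pos bhava_placements lang
instance (lagna_rasi : Int) (moon_rasi : Int) (sav_scores : List Int) (p_pos : List Int) (bhava_placements : List (String × Int)) (lang : String) (out : List (String × String)) : Decidable (Spec_generate_360_persona lagna_rasi moon_rasi sav_scores p_pos bhava_placements lang out) := by unfold Spec_generate_360_persona; infer_instance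

-- ===== CLAIM (what is proved, stated in full; the proofs are below) =====
def Claim_equal_generate_360_persona : Prop := ∀ (lagna_rasi : Int) (moon_rasi : Int) (sav_scores : List Int) (p_pos : List Int) (bhava_placements : List (String × Int)) (lang : String), Dom_generate_360_persona lagna_rasi moon_rasi sav_scores p_pos bhava_placements lang → Pre_generate_360_persona lagna_rasi moon_rasi sav_scores p_pos bhava_placements lang → Spec_generate_360_persona lagna_rasi moon_rasi sav_scores p_pos bhava_placements lang (generate_360_persona lagna_rasi moon_rasi sav_scores p_pos bhava_placements lang)

-- ===== LEMMAS AND PROOFS =====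

-- Python's descending stable insertion: insert x before the first element with a strictly smaller key.
def pvIns (x : Int × Int) (acc : List (Int × Int)) : List (Int × Int) :=
  PySem.List.insertBy (fun a b => decide (b.1 < a.1)) x acc

lemma pvIns_cons (x h : Int × Int) (t : List (Int × Int)) :
    pvIns x (h :: t) = if h.1 < x.1 then x :: h :: t else h :: pvIns x t := by
  simp [pvIns, PySem.List.insertBy]

lemma pvIns_ne_nil (x : Int × Int) (acc : List (Int × Int)) : pvIns x acc ≠ [] := by
  induction acc with
  | nil => simp [pvIns, PySem.List.insertBy]
  | cons h t ih =>
    rw [pvIns_cons]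
    split <;> simp

lemma pv_sorted_concat (xs : List (Int × Int)) (y : Int × Int) :
    PySem.List.sorted (xs ++ [y]) (fun p => p.1) true
      = pvIns y (PySem.List.sorted xs (fun p => p.1) true) := by
  rw [PySem.List.sorted_rev_eq_foldl_insertBy, PySem.List.sorted_rev_eq_foldl_insertBy,
    List.foldl_append]
  rfl

lemma pv_getLast?_cons_ne (a : Int × Int) (l : List (Int × Int)) (h : l ≠ []) :
    (a :: l).getLast? = l.getLast? := by
  obtain ⟨b, t, rfl⟩ := List.exists_cons_of_ne_nil h
  rfl

lemma pv_last_key_le (h w : Int × Int) (t : List (Int × Int))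
    (hw : (h :: t).getLast? = some w)
    (hpw : (h :: t).Pairwise (fun a b => b.1 ≤ a.1)) : w.1 ≤ h.1 := by
  induction t generalizing h with
  | nil =>
    simp only [List.getLast?_singleton, Option.some.injEq] at hw
    simp [hw]
  | cons h2 t2 ih =>
    rw [List.getLast?_cons_cons] at hw
    have h1 := (List.pairwise_cons.1 hpw).1 h2 (by simp)
    have := ih h2 hw (List.pairwise_cons.1 hpw).2
    omega

lemma pvIns_head (x h : Int × Int) (t : List (Int × Int)) :
    (pvIns x (h :: t)).head? = some (if h.1 < x.1 then x else h) := by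
  rw [pvIns_cons]
  split <;> simp

lemma pvIns_last (x w : Int × Int) (acc : List (Int × Int))
    (hw : acc.getLast? = some w)
    (hpw : acc.Pairwise (fun a b => b.1 ≤ a.1)) :
    (pvIns x acc).getLast? = some (if x.1 ≤ w.1 then x else w) := by
  induction acc generalizing w with
  | nil => simp at hw
  | cons h t ih =>
    rw [pvIns_cons]
    by_cases hb : h.1 < x.1
    · rw [if_pos hb]
      have hle : w.1 ≤ h.1 := pv_last_key_le h w t hw hpw
      rw [if_neg (by omega)]
      rw [pv_getLast?_cons_ne x (h :: t) (by simp)]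
      exact hw
    · rw [if_neg hb]
      cases t with
      | nil =>
        simp at hw
        subst hw
        rw [if_pos (by omega)]
        simp [pvIns, PySem.List.insertBy]
      | cons h2 t2 =>
        rw [List.getLast?_cons_cons] at hw
        rw [pv_getLast?_cons_ne h _ (pvIns_ne_nil x (h2 :: t2))]
        exact ih w hw (List.pairwise_cons.1 hpw).2

lemma pv_sorted_head_last (x : Int × Int) (ps : List (Int × Int)) :
    (PySem.List.sorted (x :: ps) (fun p => p.1) true).head?
      = some (ps.foldl (fun m p => if m.1 < p.1 then p else m) x)
  ∧ (PySem.List.sorted (x :: ps) (fun p => p.1) true).getLast?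
      = some (ps.foldl (fun m p => if p.1 ≤ m.1 then p else m) x) := by
  induction ps using List.reverseRecOn with
  | nil =>
    constructor <;>
      simp [PySem.List.sorted_rev_eq_foldl_insertBy, PySem.List.insertBy]
  | append_singleton ps y ih =>
    have hcat : x :: (ps ++ [y]) = (x :: ps) ++ [y] := by simp
    rw [hcat, pv_sorted_concat]
    have hne : PySem.List.sorted (x :: ps) (fun p => p.1) true ≠ [] := by
      rw [Ne, PySem.List.sorted_eq_nil_iff]; simp
    have hpw := PySem.List.sorted_pairwise_rev (x :: ps) (fun p : Int × Int => p.1)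
    obtain ⟨h, t, hS⟩ := List.exists_cons_of_ne_nil hne
    have hhead : h = ps.foldl (fun m p => if m.1 < p.1 then p else m) x := by
      have := ih.1
      rw [hS] at this
      simpa using this
    constructor
    · rw [hS, pvIns_head, List.foldl_append]
      simp [hhead]
    · have hlast := ih.2
      rw [pvIns_last y (ps.foldl (fun m p => if p.1 ≤ m.1 then p else m) x) _ hlast hpw,
        List.foldl_append]
      simp

lemma pv_top_bot (l : Int) (sav : List Int) :
    ((PySem.List.pyGetD (PySem.List.sorted
        ((PySem.List.pyRange 0 12).map (fun i => (PySem.List.pyGetD sav (PySem.Int.mod (l - 1 + i) 12) 0, i + 1)))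
        (fun x => x.1) true) 0 ((0 : Int), (0 : Int)))
      = (PySem.List.pyRange 1 12).foldl (pvTopStep l sav) (pvHouseScore l sav 0, 1))
  ∧ ((PySem.List.pyGetD (PySem.List.sorted
        ((PySem.List.pyRange 0 12).map (fun i => (PySem.List.pyGetD sav (PySem.Int.mod (l - 1 + i) 12) 0, i + 1)))
        (fun x => x.1) true) (-1) ((0 : Int), (0 : Int)))
      = (PySem.List.pyRange 1 12).foldl (pvBotStep l sav) (pvHouseScore l sav 0, 1)) := by
  have hr : PySem.List.pyRange 0 12 = 0 :: PySem.List.pyRange 1 12 := by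
    rw [PySem.List.pyRange_one_cons (by norm_num)]
    norm_num
  rw [hr, List.map_cons]
  set pairf := fun i : Int => (PySem.List.pyGetD sav (PySem.Int.mod (l - 1 + i) 12) 0, i + 1) with hpairf
  have hmain := pv_sorted_head_last (pairf 0) ((PySem.List.pyRange 1 12).map pairf)
  have hne : PySem.List.sorted (pairf 0 :: (PySem.List.pyRange 1 12).map pairf) (fun p => p.1) true ≠ [] := by
    rw [Ne, PySem.List.sorted_eq_nil_iff]; simp
  obtain ⟨h, t, hS⟩ := List.exists_cons_of_ne_nil hne
  have hmax : ((PySem.List.pyRange 1 12).map pairf).foldl (fun m p => if m.1 < p.1 then p else m) (pairf 0)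
      = (PySem.List.pyRange 1 12).foldl (pvTopStep l sav) (pvHouseScore l sav 0, 1) := by
    rw [List.foldl_map]
    rfl
  have hmin : ((PySem.List.pyRange 1 12).map pairf).foldl (fun m p => if p.1 ≤ m.1 then p else m) (pairf 0)
      = (PySem.List.pyRange 1 12).foldl (pvBotStep l sav) (pvHouseScore l sav 0, 1) := by
    rw [List.foldl_map]
    rfl
  constructor
  · rw [hS, PySem.List.pyGetD_zero_cons]
    have := hmain.1
    rw [hS] at this
    simp only [List.head?_cons, Option.some.injEq] at this
    rw [this, hmax]
  · rw [PySem.List.pyGetD_neg_one _ _ hne]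
    have := hmain.2
    rw [List.getLast?_eq_some_getLast hne] at this
    simp only [Option.some.injEq] at this
    rw [this, hmin]

lemma pv_main (lagna_rasi moon_rasi : Int) (sav_scores p_pos : List Int)
    (bhava_placements : List (String × Int)) (lang : String) :
    generate_360_persona lagna_rasi moon_rasi sav_scores p_pos bhava_placements lang
      = generate_360_persona_alt lagna_rasi moon_rasi sav_scores p_pos bhava_placements lang := by
  unfold generate_360_persona generate_360_persona_alt
  simp only [PySem.List.foldl_prod_mk (pvTopStep lagna_rasi sav_scores) (pvBotStep lagna_rasi sav_scores)
      (PySem.List.pyRange 1 12) (pvHouseScore lagna_rasi sav_scores 0, 1) (pvHouseScore lagna_rasi sav_scores 0, 1),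
    (pv_top_bot lagna_rasi sav_scores).1, (pv_top_bot lagna_rasi sav_scores).2]
  rfl

-- ===== VERDICT (by name: the statement is the Claim_ definition above) =====
theorem generate_360_persona_spec : Claim_equal_generate_360_persona := by
  intro lagna_rasi moon_rasi sav_scores p_pos bhava_placements lang _ _
  exact pv_main lagna_rasi moon_rasi sav_scores p_pos bhava_placements lang
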